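-- pv_equiv track=rewrite | github.com/adwaitmathkari/Python-Algorithms-Practice | fishNthYear.py | population
-- ===== SOURCE A (Python) =====
-- def population(n, nb, g, l, r):
--
--     if n==0:
--         if l>0:
--             return nb
--         return 0
--
--     if r<=0:
--
--         return population(n-1, nb, g, l-1, r-1)
--
--     else:
--         return population(n-1, nb, g, l-1, r-1) + population(n-1, nb*g, g, l,r)
-- ===== SOURCE B (Python) =====
-- def population(n, nb, g, l, r):
--     # Answer is linear in nb: population(n, nb, g, l, r) = nb * c(n, r), where the
--     # coefficient c(k, rr) satisfies  c(0, rr) = (1 if l - r + rr > 0 else 0),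
--     # c(k, rr) = c(k-1, rr-1) + g * c(k-1, rr) for rr > 0, and for rr <= 0 the
--     # recursion never branches, giving the closed form c(k, rr) = (1 if l - r + rr - k > 0 else 0).
--     # Dynamic programming over a sliding window of positive rr values, O(n * min(n, r)).
--     if r <= 0:
--         return nb if l - n > 0 else 0
--     lo = r - n if r - n > 1 else 1
--     row = [1 if l - r + rr > 0 else 0 for rr in range(lo, r + 1)]
--     for k in range(1, n + 1):
--         new_lo = r - n + k if r - n + k > 1 else 1
--         cur = []
--         for rr in range(new_lo, r + 1):
--             if rr - 1 >= lo:
--                 left = row[rr - 1 - lo]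
--             else:
--                 left = 1 if l - r - k + 1 > 0 else 0
--             cur.append(left + g * row[rr - lo])
--         row, lo = cur, new_lo
--     return nb * row[0]
-- ===== Notes on version B (the rewrite author's own statement) =====
-- stated objective: faster
-- what changed: Replaces A's exponential two-way branching recursion with a bottom-up dynamic program: the answer is linear in nb, so B factors nb out and fills rows of the nb-coefficient c(k, rr) over a sliding window of at most min(n, r)+1 relevant r-values (values at rr <= 0 have the closed form 1 if l - r + rr - k > 0 else 0).
import Mathlib
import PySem

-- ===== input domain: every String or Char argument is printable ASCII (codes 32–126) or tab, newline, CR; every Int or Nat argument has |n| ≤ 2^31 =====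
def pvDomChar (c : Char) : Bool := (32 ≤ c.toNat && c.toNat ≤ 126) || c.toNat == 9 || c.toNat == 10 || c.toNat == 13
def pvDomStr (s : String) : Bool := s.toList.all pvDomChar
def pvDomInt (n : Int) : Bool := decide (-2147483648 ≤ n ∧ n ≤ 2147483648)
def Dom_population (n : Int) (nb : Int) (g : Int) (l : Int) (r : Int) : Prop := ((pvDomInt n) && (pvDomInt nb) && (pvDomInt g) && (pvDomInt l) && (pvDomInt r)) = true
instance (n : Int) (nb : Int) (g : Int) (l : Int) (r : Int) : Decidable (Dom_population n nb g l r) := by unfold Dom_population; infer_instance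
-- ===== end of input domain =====

-- B replaces A's exponential branching recursion by a bottom-up DP over a sliding
-- window of r-values (the answer is linear in nb, so nb is factored out); intended as faster.

-- ===== PORT A =====
-- literal transliteration of A; fuel = n.toNat + 1 suffices since n decreases by 1
-- each call and the recursion only stops at n = 0 (Pre_ restricts to 0 ≤ n, where
-- the Python returns; for n < 0 the Python never returns).
def populationA (fuel : Nat) (n nb g l r : Int) : Int :=
  match fuel with
  | 0 => 0
  | Nat.succ fuel =>
    if n = 0 then (if 0 < l then nb else 0)
    else if r ≤ 0 then populationA fuel (n-1) nb g (l-1) (r-1)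
    else populationA fuel (n-1) nb g (l-1) (r-1) + populationA fuel (n-1) (nb*g) g l r

def population (n : Int) (nb : Int) (g : Int) (l : Int) (r : Int) : Int :=
  populationA (n.toNat + 1) n nb g l r

-- ===== PORT B =====
-- transliteration of Source B; row lookups row[i] are in range under Pre_, ported as pyGetD.
def population_alt (n : Int) (nb : Int) (g : Int) (l : Int) (r : Int) : Int :=
  if r ≤ 0 then (if 0 < l - n then nb else 0)
  else
    let lo0 : Int := if 1 < r - n then r - n else 1
    let row0 : List Int :=
      (PySem.List.pyRange lo0 (r+1) 1).map (fun rr => if 0 < l - r + rr then (1:Int) else 0)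
    let st :=
      (PySem.List.pyRange 1 (n+1) 1).foldl (fun (st : List Int × Int) k =>
        let row := st.1
        let lo := st.2
        let newLo : Int := if 1 < r - n + k then r - n + k else 1
        let cur :=
          (PySem.List.pyRange newLo (r+1) 1).foldl (fun cur rr =>
            let left : Int :=
              if lo ≤ rr - 1 then PySem.List.pyGetD row (rr - 1 - lo) 0
              else (if 0 < l - r - k + 1 then 1 else 0)
            cur ++ [left + g * PySem.List.pyGetD row (rr - lo) 0]) []
        (cur, newLo)) (row0, lo0)
    nb * PySem.List.pyGetD st.1 0 0

-- ===== PRECONDITION & SPEC =====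
-- Pre_ excludes n < 0, where the Python A recurses forever (RecursionError), never returning.
def Pre_population (n : Int) (nb : Int) (g : Int) (l : Int) (r : Int) : Prop := 0 ≤ n
instance (n : Int) (nb : Int) (g : Int) (l : Int) (r : Int) : Decidable (Pre_population n nb g l r) := by
  unfold Pre_population; infer_instance
def pvWitness_population : Int × Int × Int × Int × Int := (3, 2, 2, 4, 2)

def Spec_population (n : Int) (nb : Int) (g : Int) (l : Int) (r : Int) (out : Int) : Prop := out = population_alt n nb g l r
instance (n : Int) (nb : Int) (g : Int) (l : Int) (r : Int) (out : Int) : Decidable (Spec_population n nb g l r out) := by unfold Spec_population; infer_instance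

-- ===== CLAIM (what is proved, stated in full; the proofs are below) =====
def Claim_equal_population : Prop := ∀ (n : Int) (nb : Int) (g : Int) (l : Int) (r : Int), Dom_population n nb g l r → Pre_population n nb g l r → Spec_population n nb g l r (population n nb g l r)

-- ===== LEMMAS AND PROOFS =====

-- the nb-coefficient of the answer: c(k, rr), recurrence shared by both proofs
def cDP (d g : Int) : Nat → Int → Int
  | 0, rr => if 0 < d + rr then 1 else 0
  | (k+1), rr => if rr ≤ 0 then cDP d g k (rr-1) else cDP d g k (rr-1) + g * cDP d g k rr

lemma cDP_nonpos (d g : Int) (k : Nat) : ∀ rr : Int, rr ≤ 0 →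
    cDP d g k rr = if 0 < d + rr - k then 1 else 0 := by
  induction k with
  | zero => intro rr _; simp [cDP]
  | succ k ih =>
    intro rr h
    rw [cDP, if_pos h, ih (rr-1) (by omega)]
    have : d + (rr - 1) - (k : Int) = d + rr - (k+1 : Nat) := by push_cast; ring
    rw [this]

lemma ite_max (x : Int) : (if 1 < x then x else 1) = max 1 x := by split <;> omega

lemma getD_map_pyRange_int (f : Int → Int) (a b i : Int) (h0 : 0 ≤ i) (h1 : a + i < b) :
    PySem.List.pyGetD ((PySem.List.pyRange a b 1).map f) i 0 = f (a + i) := by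
  have h2 : i = ((i.toNat : Nat) : Int) := by omega
  rw [h2, PySem.List.pyGetD_natCast]
  have hlt : i.toNat < ((PySem.List.pyRange a b 1).map f).length := by
    rw [List.length_map, PySem.List.length_pyRange_one]; omega
  rw [List.getD_eq_getElem _ _ hlt, List.getElem_map, PySem.List.getElem_pyRange_one]

-- A equals nb * c(n, r)
lemma populationA_eq (k : Nat) : ∀ (n nb g l r : Int), n = (k : Int) →
    populationA (k+1) n nb g l r = nb * cDP (l - r) g k r := by
  induction k with
  | zero =>
    intro n nb g l r hn
    subst hn
    have hlr : l - r + r = l := by ring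
    by_cases hl : 0 < l
    · simp [populationA, cDP, hlr, hl]
    · simp [populationA, cDP, hlr, hl]
  | succ k ih =>
    intro n nb g l r hn
    have hne : ¬ (n = 0) := by omega
    have hn1 : n - 1 = (k : Int) := by omega
    rw [populationA, if_neg hne]
    by_cases hr : r ≤ 0
    · rw [if_pos hr, ih (n-1) nb g (l-1) (r-1) hn1]
      have hd : l - 1 - (r - 1) = l - r := by ring
      rw [hd, cDP, if_pos hr]
    · rw [if_neg hr, ih (n-1) nb g (l-1) (r-1) hn1, ih (n-1) (nb*g) g l r hn1]
      have hd : l - 1 - (r - 1) = l - r := by ring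
      rw [hd, cDP, if_neg hr]
      ring

-- the row held by B's outer loop after j iterations
def rowOf (n g l r : Int) (j : Nat) : List Int :=
  (PySem.List.pyRange (max 1 (r - n + j)) (r+1) 1).map (cDP (l - r) g j)

lemma alt_invariant (n g l r : Int) (j : Nat) (hj : (j : Int) ≤ n) :
    (PySem.List.pyRange 1 ((j:Int)+1) 1).foldl (fun (st : List Int × Int) k =>
        let row := st.1
        let lo := st.2
        let newLo : Int := if 1 < r - n + k then r - n + k else 1
        let cur :=
          (PySem.List.pyRange newLo (r+1) 1).foldl (fun cur rr =>
            let left : Int :=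
              if lo ≤ rr - 1 then PySem.List.pyGetD row (rr - 1 - lo) 0
              else (if 0 < l - r - k + 1 then 1 else 0)
            cur ++ [left + g * PySem.List.pyGetD row (rr - lo) 0]) []
        (cur, newLo))
      ((PySem.List.pyRange (if 1 < r - n then r - n else 1) (r+1) 1).map
          (fun rr => if 0 < l - r + rr then (1:Int) else 0),
       (if 1 < r - n then r - n else 1))
    = (rowOf n g l r j, max 1 (r - n + j)) := by
  induction j with
  | zero =>
    have h0 : ((0:Nat):Int) + 1 = 1 := by norm_num
    rw [h0, PySem.List.pyRange_one_eq_nil (le_refl 1), List.foldl_nil, Prod.mk.injEq]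
    refine ⟨?_, ?_⟩
    · rw [rowOf, ite_max]
      have : max 1 (r - n + ((0:Nat):Int)) = max 1 (r - n) := by push_cast; ring_nf
      rw [this]
      refine List.map_congr_left ?_
      intro x _
      simp [cDP]
    · rw [ite_max]; push_cast; ring_nf
  | succ j ih =>
    have h1 : (1:Int) ≤ (j:Int) + 1 := by omega
    rw [show ((j+1:Nat):Int) + 1 = ((j:Int)+1) + 1 by push_cast; ring,
        PySem.List.pyRange_one_succ_right h1, List.foldl_append, ih (by push_cast at hj ⊢; omega)]
    simp only [List.foldl_cons, List.foldl_nil]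
    have hnewLo : (if 1 < r - n + ((j:Int)+1) then r - n + ((j:Int)+1) else 1)
        = max 1 (r - n + ((j+1:Nat):Int)) := by rw [ite_max]; push_cast; ring_nf
    set lo := max 1 (r - n + (j:Int)) with hlo
    set newLo := max 1 (r - n + ((j:Int)+1)) with hnew
    have hstep : ∀ rr ∈ PySem.List.pyRange (if 1 < r - n + ((j:Int)+1) then r - n + ((j:Int)+1) else 1) (r+1) 1,
        ((if lo ≤ rr - 1 then PySem.List.pyGetD (rowOf n g l r j) (rr - 1 - lo) 0
          else (if 0 < l - r - ((j:Int)+1) + 1 then (1:Int) else 0))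
         + g * PySem.List.pyGetD (rowOf n g l r j) (rr - lo) 0)
        = cDP (l - r) g (j+1) rr := by
      intro rr hrr
      rw [ite_max] at hrr
      rw [PySem.List.mem_pyRange_one] at hrr
      obtain ⟨hrr1, hrr2⟩ := hrr
      have hrrpos : 1 ≤ rr := by omega
      have hright : PySem.List.pyGetD (rowOf n g l r j) (rr - lo) 0 = cDP (l - r) g j rr := by
        rw [rowOf, getD_map_pyRange_int _ _ _ _ (by omega) (by omega)]
        congr 1; omega
      have hleft : (if lo ≤ rr - 1 then PySem.List.pyGetD (rowOf n g l r j) (rr - 1 - lo) 0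
          else (if 0 < l - r - ((j:Int)+1) + 1 then (1:Int) else 0)) = cDP (l - r) g j (rr - 1) := by
        by_cases hc : lo ≤ rr - 1
        · rw [if_pos hc, rowOf, getD_map_pyRange_int _ _ _ _ (by omega) (by omega)]
          congr 1; omega
        · rw [if_neg hc]
          have hrr1' : rr = 1 := by omega
          rw [cDP_nonpos _ _ _ _ (by omega)]
          have : l - r + (rr - 1) - (j:Int) = l - r - ((j:Int)+1) + 1 := by omega
          rw [this]
      rw [hright, hleft, cDP, if_neg (by omega)]
    rw [Prod.mk.injEq]
    refine ⟨?_, ?_⟩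
    · rw [PySem.List.foldl_congr_mem' _ _
          (fun cur rr => cur ++ [cDP (l - r) g (j+1) rr]) _
          (by intro x hx acc; rw [hstep x hx])]
      rw [PySem.List.foldl_append_singleton_eq_map, List.nil_append, rowOf, ite_max]
      have hm : max 1 (r - n + ((j:Int)+1)) = max 1 (r - n + ((j+1:Nat):Int)) := by
        push_cast; ring_nf
      rw [hm]
    · exact hnewLo

lemma alt_eq (n nb g l r : Int) (hn : 0 ≤ n) :
    population_alt n nb g l r = nb * cDP (l - r) g n.toNat r := by
  by_cases hr : r ≤ 0
  · rw [population_alt, if_pos hr, cDP_nonpos _ _ _ _ hr]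
    have : l - r + r - (n.toNat : Int) = l - n := by omega
    rw [this]
    split <;> ring
  · rw [population_alt, if_neg hr]
    simp only []
    have hn' : ((n.toNat : Int)) = n := by omega
    rw [show n + 1 = (n.toNat : Int) + 1 by omega,
        alt_invariant n g l r n.toNat (by omega)]
    have hmax : max 1 (r - n + (n.toNat : Int)) = r := by omega
    rw [rowOf, hmax, PySem.List.pyRange_one_singleton, List.map_singleton]
    rw [PySem.List.pyGetD_zero_cons]

-- ===== VERDICT (by name: the statement is the Claim_ definition above) =====
theorem population_spec : Claim_equal_population := by
  intro n nb g l r _ hpre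
  have h0 : 0 ≤ n := hpre
  unfold Spec_population population
  rw [alt_eq n nb g l r h0]
  exact populationA_eq n.toNat n nb g l r (by omega)
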